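-- pv_equiv track=rewrite | github.com/t3nsor98/100-days-of-code-PYTHON | exam.py | days_to_reach_rostering_value
-- ===== SOURCE A (Python) =====
-- from collections import defaultdict
--
-- def days_to_reach_rostering_value(N, M, friendships, K):
--     # Create adjacency list for friendships
--     graph = defaultdict(list)
--     for a, b in friendships:
--         graph[a].append(b)
--         graph[b].append(a)
--
--     # Initialize attendance
--     attendance = [1] * N  # 1 means WFO, 0 means WFH
--     rostering_value = N  # Day 1 all are WFO
--     cumulative_value = rostering_value
--     days = 1
--
--     while cumulative_value < K:
--         new_attendance = attendance[:]
--         for i in range(N):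
--             friends_in_office = sum(attendance[friend] for friend in graph[i])
--             if attendance[i] == 1:  # Currently WFO
--                 new_attendance[i] = 1 if friends_in_office == 3 else 0
--             else:  # Currently WFH
--                 new_attendance[i] = 1 if friends_in_office < 3 else 0
--
--         attendance = new_attendance
--         rostering_value = sum(attendance)
--         cumulative_value += rostering_value
--         days += 1
--
--     return days
-- ===== SOURCE B (Python) =====
-- def days_to_reach_rostering_value(N, M, friendships, K):
--     # Edge-centric day step: no adjacency structure; one pass over the edge
--     # list per day accumulates each node's number of friends in office.
--     attendance = [1] * N
--     cumulative = N
--     days = 1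
--     while cumulative < K:
--         counts = [0] * N
--         for a, b in friendships:
--             if 0 <= a < N:
--                 counts[a] += attendance[b]
--             if 0 <= b < N:
--                 counts[b] += attendance[a]
--         attendance = [(1 if c == 3 else 0) if x == 1 else (1 if c < 3 else 0)
--                       for x, c in zip(attendance, counts)]
--         cumulative += sum(attendance)
--         days += 1
--     return days
-- ===== Notes on version B (the rewrite author's own statement) =====
-- stated objective: alternative
-- what changed: B eliminates A's prebuilt defaultdict adjacency list: each day it accumulates every node's number of friends in office in a counts array by a single edge-centric pass over the friendship list, then rebuilds attendance by zipping it with the counts, instead of A's per-node generator sums over the dict of neighbour lists.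
import Mathlib
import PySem

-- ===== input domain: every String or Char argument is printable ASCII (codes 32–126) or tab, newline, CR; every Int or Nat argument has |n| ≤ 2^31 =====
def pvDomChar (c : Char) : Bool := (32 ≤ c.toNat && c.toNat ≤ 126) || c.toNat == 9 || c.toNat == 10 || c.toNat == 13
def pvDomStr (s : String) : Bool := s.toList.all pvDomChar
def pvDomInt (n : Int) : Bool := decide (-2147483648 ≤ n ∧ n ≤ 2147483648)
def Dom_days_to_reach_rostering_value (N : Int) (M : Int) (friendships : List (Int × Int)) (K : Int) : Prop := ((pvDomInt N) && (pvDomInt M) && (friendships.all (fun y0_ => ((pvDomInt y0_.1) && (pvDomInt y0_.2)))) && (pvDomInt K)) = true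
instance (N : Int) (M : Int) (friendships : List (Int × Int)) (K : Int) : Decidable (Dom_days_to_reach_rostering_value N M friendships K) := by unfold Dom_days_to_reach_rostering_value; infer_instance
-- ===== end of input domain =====

-- B drops A's prebuilt defaultdict adjacency list: each day it fills a counts array in one
-- edge-centric pass over the friendship list (objective: alternative traversal, same per-day cost).
-- Return-value equivalence; neither version mutates its arguments.

-- ===== PORT A =====
-- A's graph: defaultdict(list); graph[a].append(b); graph[b].append(a)
def pvGraphA (friendships : List (Int × Int)) : PySem.Dict Int (List Int) :=
  friendships.foldl
    (fun g p => (g.modify p.1 [] (· ++ [p.2])).modify p.2 [] (· ++ [p.1]))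
    PySem.Dict.empty

-- one day step of A: for i in range(N), sum attendance[f] over graph[i], then the WFO/WFH rule.
-- attendance[f] is (pyGet? …).getD 0: Python raises IndexError exactly where pyGet? is none; Pre_ excludes that.
def pvStepA (att : List Int) (g : PySem.Dict Int (List Int)) (N : Int) : List Int :=
  (PySem.List.pyRange 0 N 1).map (fun i =>
    let fio := ((g.getD i []).map (fun f => (PySem.List.pyGet? att f).getD 0)).sum
    if (PySem.List.pyGet? att i).getD 0 = 1 then (if fio = 3 then (1 : Int) else 0)
    else (if fio < 3 then 1 else 0))

-- the while-loop; the fuel only totalizes it (on Pre_ inputs, where A terminates, it is never exhausted)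
def pvLoopA (K N : Int) (g : PySem.Dict Int (List Int)) : Nat → List Int → Int → Int → Int
  | 0, _, _, days => days
  | fuel + 1, att, cum, days =>
    if cum < K then
      let newAtt := pvStepA att g N
      pvLoopA K N g fuel newAtt (cum + newAtt.sum) (days + 1)
    else days

def days_to_reach_rostering_value (N : Int) (M : Int) (friendships : List (Int × Int)) (K : Int) : Int :=
  pvLoopA K N (pvGraphA friendships) (2 * K + 8).toNat (List.replicate N.toNat 1) N 1

-- ===== PORT B =====
-- counts = [0]*N; for a, b in friendships: if 0<=a<N: counts[a] += attendance[b]; if 0<=b<N: counts[b] += attendance[a]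
def pvCountsB (N : Int) (att : List Int) (friendships : List (Int × Int)) : List Int :=
  friendships.foldl
    (fun cs p =>
      let cs1 := if 0 ≤ p.1 ∧ p.1 < N then
          cs.set p.1.toNat (cs.getD p.1.toNat 0 + (PySem.List.pyGet? att p.2).getD 0) else cs
      if 0 ≤ p.2 ∧ p.2 < N then
          cs1.set p.2.toNat (cs1.getD p.2.toNat 0 + (PySem.List.pyGet? att p.1).getD 0) else cs1)
    (List.replicate N.toNat 0)

def pvStepB (N : Int) (att : List Int) (friendships : List (Int × Int)) : List Int :=
  (att.zip (pvCountsB N att friendships)).map (fun p =>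
    if p.1 = 1 then (if p.2 = 3 then (1 : Int) else 0) else (if p.2 < 3 then 1 else 0))

def pvLoopB (K N : Int) (friendships : List (Int × Int)) : Nat → List Int → Int → Int → Int
  | 0, _, _, days => days
  | fuel + 1, att, cum, days =>
    if cum < K then
      let newAtt := pvStepB N att friendships
      pvLoopB K N friendships fuel newAtt (cum + newAtt.sum) (days + 1)
    else days

def days_to_reach_rostering_value_alt (N : Int) (M : Int) (friendships : List (Int × Int)) (K : Int) : Int :=
  pvLoopB K N friendships (2 * K + 8).toNat (List.replicate N.toNat 1) N 1

-- ===== PRECONDITION & SPEC =====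
-- Pre_ is exactly where the Python A returns: if K ≤ N it returns 1 before entering the loop; otherwise
-- the loop runs, so N must be positive (with N ≤ 0 the roster is empty and cumulative never grows, so the
-- loop never ends) and every friend of an existing node 0 ≤ i < N must be an index in [-N, N) (else IndexError).
-- (Both fuel-totalized ports agree on every input, so the proof below does not consume Pre_; Pre_ only
-- delimits where the Python A actually returns, which is what the ported equality is claimed about.)
def Pre_days_to_reach_rostering_value (N : Int) (M : Int) (friendships : List (Int × Int)) (K : Int) : Prop :=
  K ≤ N ∨ (0 < N ∧ ∀ p ∈ friendships,
    (0 ≤ p.1 ∧ p.1 < N → -N ≤ p.2 ∧ p.2 < N) ∧ (0 ≤ p.2 ∧ p.2 < N → -N ≤ p.1 ∧ p.1 < N))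
instance (N : Int) (M : Int) (friendships : List (Int × Int)) (K : Int) : Decidable (Pre_days_to_reach_rostering_value N M friendships K) := by unfold Pre_days_to_reach_rostering_value; infer_instance

def pvWitness_days_to_reach_rostering_value : Int × Int × (List (Int × Int)) × Int := (3, 2, [(0, 1), (1, 2)], 10)

def Spec_days_to_reach_rostering_value (N : Int) (M : Int) (friendships : List (Int × Int)) (K : Int) (out : Int) : Prop := out = days_to_reach_rostering_value_alt N M friendships K
instance (N : Int) (M : Int) (friendships : List (Int × Int)) (K : Int) (out : Int) : Decidable (Spec_days_to_reach_rostering_value N M friendships K out) := by unfold Spec_days_to_reach_rostering_value; infer_instance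

-- ===== CLAIM (what is proved, stated in full; the proofs are below) =====
def Claim_equal_days_to_reach_rostering_value : Prop := ∀ (N : Int) (M : Int) (friendships : List (Int × Int)) (K : Int), Dom_days_to_reach_rostering_value N M friendships K → Pre_days_to_reach_rostering_value N M friendships K → Spec_days_to_reach_rostering_value N M friendships K (days_to_reach_rostering_value N M friendships K)

-- ===== LEMMAS AND PROOFS =====

theorem pv_set_getD (cs : List Int) (m x : Nat) (v : Int) (hm : m < cs.length) :
    (cs.set m v).getD x 0 = if x = m then v else cs.getD x 0 := by
  simp only [List.getD, List.getElem?_set]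
  by_cases h : x = m
  · subst h; simp [hm]
  · have h2 : ¬ (m = x) := fun hh => h hh.symm
    simp [h, h2]
theorem pv_step_once (att : List Int) (N : Int) (g : PySem.Dict Int (List Int)) (cs : List Int)
    (a b : Int) (hlen : cs.length = N.toNat)
    (hinv : ∀ i : Nat, i < N.toNat →
      cs.getD i 0 = ((( g.getD (i : Int) []).map (fun f => (PySem.List.pyGet? att f).getD 0)).sum)) :
    ∀ i : Nat, i < N.toNat →
      ((if 0 ≤ b ∧ b < N then
          (if 0 ≤ a ∧ a < N then cs.set a.toNat (cs.getD a.toNat 0 + (PySem.List.pyGet? att b).getD 0) else cs).set b.toNat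
            ((if 0 ≤ a ∧ a < N then cs.set a.toNat (cs.getD a.toNat 0 + (PySem.List.pyGet? att b).getD 0) else cs).getD b.toNat 0 + (PySem.List.pyGet? att a).getD 0)
        else (if 0 ≤ a ∧ a < N then cs.set a.toNat (cs.getD a.toNat 0 + (PySem.List.pyGet? att b).getD 0) else cs))).getD i 0 =
      ((((g.modify a [] (· ++ [b])).modify b [] (· ++ [a])).getD (i : Int) []).map (fun f => (PySem.List.pyGet? att f).getD 0)).sum := by
  intro i hi
  have hiN : (i : Int) < N := by omega
  have hi0 : (0 : Int) ≤ (i : Int) := by omega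
  have hv := hinv i hi
  simp only [PySem.Dict.getD_modify]
  by_cases hib : (i : Int) = b <;> by_cases hia : (i : Int) = a
  · -- i = a = b
    subst hib; subst hia
    rw [if_pos ⟨hi0, hiN⟩, if_pos ⟨hi0, hiN⟩]
    simp only [Int.toNat_natCast]
    rw [pv_set_getD _ _ _ _ (by rw [List.length_set, hlen]; exact hi),
        pv_set_getD _ _ _ _ (by rw [hlen]; exact hi)]
    simp at hv ⊢
    linarith [hv]
  · -- i = b ≠ a
    subst hib
    rw [if_pos ⟨hi0, hiN⟩]
    simp only [Int.toNat_natCast]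
    rw [pv_set_getD _ _ _ _ (by split_ifs <;> simp [List.length_set, hlen, hi])]
    have h1 : (if 0 ≤ a ∧ a < N then cs.set a.toNat (cs.getD a.toNat 0 + (PySem.List.pyGet? att (i : Int)).getD 0) else cs).getD i 0 = cs.getD i 0 := by
      split_ifs with ha
      · rw [pv_set_getD _ _ _ _ (by rw [hlen]; omega), if_neg (show ¬ (i = a.toNat) by omega)]
      · rfl
    rw [h1]
    simp [hia] at hv ⊢
    linarith [hv]
  · -- i = a ≠ b
    subst hia
    rw [if_neg hib]
    by_cases hbr : 0 ≤ b ∧ b < N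
    · rw [if_pos hbr, if_pos ⟨hi0, hiN⟩]
      simp only [Int.toNat_natCast]
      rw [pv_set_getD _ _ _ _ (by rw [List.length_set, hlen]; omega),
          if_neg (show ¬ (i = b.toNat) by omega),
          pv_set_getD _ _ _ _ (by rw [hlen]; exact hi)]
      simp at hv ⊢
      linarith [hv]
    · rw [if_neg hbr, if_pos ⟨hi0, hiN⟩]
      simp only [Int.toNat_natCast]
      rw [pv_set_getD _ _ _ _ (by rw [hlen]; exact hi)]
      simp at hv ⊢
      linarith [hv]
  · -- i ≠ a, i ≠ b
    rw [if_neg hib]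
    have h1 : (if 0 ≤ a ∧ a < N then cs.set a.toNat (cs.getD a.toNat 0 + (PySem.List.pyGet? att b).getD 0) else cs).getD i 0 = cs.getD i 0 := by
      split_ifs with ha
      · rw [pv_set_getD _ _ _ _ (by rw [hlen]; omega), if_neg (show ¬ (i = a.toNat) by omega)]
      · rfl
    by_cases hbr : 0 ≤ b ∧ b < N
    · rw [if_pos hbr,
          pv_set_getD _ _ _ _ (by split_ifs <;> simp [List.length_set, hlen, hi] <;> omega),
          if_neg (show ¬ (i = b.toNat) by omega), h1]
      simp [hia] at hv ⊢
      linarith [hv]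
    · rw [if_neg hbr, h1]
      simp [hia] at hv ⊢
      linarith [hv]

-- folding the edge list preserves length and the counts/adjacency-sum invariant
theorem pv_counts_inv (att : List Int) (N : Int) (edges : List (Int × Int)) :
    ∀ (g : PySem.Dict Int (List Int)) (cs : List Int),
    cs.length = N.toNat →
    (∀ i : Nat, i < N.toNat →
      cs.getD i 0 = (((g.getD (i : Int) []).map (fun f => (PySem.List.pyGet? att f).getD 0)).sum)) →
    (edges.foldl
      (fun cs p =>
        let cs1 := if 0 ≤ p.1 ∧ p.1 < N then
            cs.set p.1.toNat (cs.getD p.1.toNat 0 + (PySem.List.pyGet? att p.2).getD 0) else cs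
        if 0 ≤ p.2 ∧ p.2 < N then
            cs1.set p.2.toNat (cs1.getD p.2.toNat 0 + (PySem.List.pyGet? att p.1).getD 0) else cs1)
      cs).length = N.toNat ∧
    (∀ i : Nat, i < N.toNat →
      (edges.foldl
        (fun cs p =>
          let cs1 := if 0 ≤ p.1 ∧ p.1 < N then
              cs.set p.1.toNat (cs.getD p.1.toNat 0 + (PySem.List.pyGet? att p.2).getD 0) else cs
          if 0 ≤ p.2 ∧ p.2 < N then
              cs1.set p.2.toNat (cs1.getD p.2.toNat 0 + (PySem.List.pyGet? att p.1).getD 0) else cs1)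
        cs).getD i 0 =
      (((edges.foldl (fun g p => (g.modify p.1 [] (· ++ [p.2])).modify p.2 [] (· ++ [p.1])) g).getD (i : Int) []).map
        (fun f => (PySem.List.pyGet? att f).getD 0)).sum) := by
  induction edges with
  | nil => intro g cs h1 h2; exact ⟨h1, h2⟩
  | cons e rest ih =>
    intro g cs hlen hinv
    simp only [List.foldl_cons]
    apply ih
    · -- length preserved by one step
      dsimp only
      split_ifs <;> simp [List.length_set, hlen]
    · -- invariant preserved by one step
      dsimp only
      exact pv_step_once att N g cs e.1 e.2 hlen hinv

theorem pv_counts_len (att : List Int) (N : Int) (edges : List (Int × Int)) :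
    (pvCountsB N att edges).length = N.toNat :=
  (pv_counts_inv att N edges PySem.Dict.empty (List.replicate N.toNat 0)
    (by simp) (by intro i hi; simp [PySem.Dict.getD_empty])).1

theorem pv_counts_spec (att : List Int) (N : Int) (edges : List (Int × Int)) (i : Nat) (hi : i < N.toNat) :
    (pvCountsB N att edges).getD i 0 =
      (((pvGraphA edges).getD (i : Int) []).map (fun f => (PySem.List.pyGet? att f).getD 0)).sum :=
  (pv_counts_inv att N edges PySem.Dict.empty (List.replicate N.toNat 0)
    (by simp) (by intro j hj; simp [PySem.Dict.getD_empty])).2 i hi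

theorem pv_step_eq (N : Int) (friendships : List (Int × Int)) (att : List Int)
    (hlen : att.length = N.toNat) :
    pvStepA att (pvGraphA friendships) N = pvStepB N att friendships := by
  have hclen := pv_counts_len att N friendships
  apply List.ext_getElem
  · simp [pvStepA, pvStepB, PySem.List.length_pyRange_one, hlen, hclen]
  · intro k hk1 hk2
    have hkN : k < N.toNat := by
      simpa [pvStepA, PySem.List.length_pyRange_one] using hk1
    simp only [pvStepA, pvStepB, List.getElem_map, PySem.List.getElem_pyRange_one, List.getElem_zip]
    have hidx : (0 : Int) + (k : Int) = (k : Int) := by ring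
    rw [hidx]
    have hval : (PySem.List.pyGet? att (k : Int)).getD 0 = att[k]'(by omega) := by
      rw [PySem.List.pyGet?_natCast, List.getElem?_eq_getElem (by omega)]
      rfl
    have hcount : (((pvGraphA friendships).getD ((k : Int)) []).map
        (fun f => (PySem.List.pyGet? att f).getD 0)).sum = (pvCountsB N att friendships)[k]'(by omega) := by
      rw [← pv_counts_spec att N friendships k hkN]
      simp [List.getD, List.getElem?_eq_getElem (show k < (pvCountsB N att friendships).length by omega)]
    rw [hval, hcount]

theorem pv_stepB_len (N : Int) (friendships : List (Int × Int)) (att : List Int)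
    (hlen : att.length = N.toNat) : (pvStepB N att friendships).length = N.toNat := by
  simp [pvStepB, hlen, pv_counts_len att N friendships]

theorem pv_loop_eq (K N : Int) (friendships : List (Int × Int)) :
    ∀ (fuel : Nat) (att : List Int) (cum days : Int), att.length = N.toNat →
      pvLoopA K N (pvGraphA friendships) fuel att cum days = pvLoopB K N friendships fuel att cum days := by
  intro fuel
  induction fuel with
  | zero => intro att cum days _; rfl
  | succ f ih =>
    intro att cum days hlen
    simp only [pvLoopA, pvLoopB]
    split_ifs with h
    · rw [pv_step_eq N friendships att hlen]
      exact ih _ _ _ (pv_stepB_len N friendships att hlen)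
    · rfl

-- ===== VERDICT (by name: the statement is the Claim_ definition above) =====
theorem days_to_reach_rostering_value_spec : Claim_equal_days_to_reach_rostering_value := by
  intro N M friendships K _hDom _hPre
  unfold Spec_days_to_reach_rostering_value days_to_reach_rostering_value days_to_reach_rostering_value_alt
  exact pv_loop_eq K N friendships _ _ _ _ (by simp)
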